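-- pv_equiv track=rewrite | github.com/tianzesun/CodeProvenance | uploads/80f52946/wackychat.py | get_most_popular_group
-- ===== SOURCE A (Python) =====
-- def get_most_popular_group(context: dict) -> int | None:
--     '''
--     Returns the id of the group with the most number of messages.
--     If there are no groups, returns None. If there are multiple
--     groups with the same number of messages, return the
--     group with the smallest id.
--     >>> get_most_popular_group({}) == None
--     True
--     >>> get_most_popular_group({'groups': []}) == None
--     True
--     >>> get_most_popular_group(SAMPLE_DICT_CONTEXT_1) == 9119
--     True
--     '''
--     if not 'messages' in context or context['messages'] == []:
--         if not 'groups' in context or context['groups'] == []: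
--             return None
--         return min(group["id"] for group in context['groups'])
--     channel_to_group = {}
--     group_to_tally = {}
--     for channel in context['channels']:
--         channel_to_group[channel['id']] = channel['group']
--     for message in context['messages']:
--         key = channel_to_group[message['channel']]
--         if key in group_to_tally:
--             group_to_tally[key] += 1
--         else:
--             group_to_tally[key] = 1
--     key = list(group_to_tally.keys())[0]
--     for current_object in group_to_tally.items():
--         if current_object[1] > group_to_tally[key]:
--             key = current_object[0]
--         elif current_object[1] == group_to_tally[key]:
--             key = min(key, current_object[0])
--     return key
-- ===== SOURCE B (Python) =====
-- def get_most_popular_group(context: dict) -> int | None: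
--     if not 'messages' in context or context['messages'] == []:
--         if not 'groups' in context or context['groups'] == []:
--             return None
--         return min(group["id"] for group in context['groups'])
--     channel_to_group = {channel['id']: channel['group'] for channel in context['channels']}
--     keys = sorted(channel_to_group[message['channel']] for message in context['messages'])
--     # sort-then-run-length scan: equal group ids are contiguous; the first run whose
--     # length strictly beats the best so far wins, so ties keep the smallest id.
--     best_id, best_count = keys[0], 0
--     i, n = 0, len(keys)
--     while i < n:
--         j = i
--         while j < n and keys[j] == keys[i]:
--             j += 1
--         if j - i > best_count:
--             best_id, best_count = keys[i], j - i
--         i = j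
--     return best_id
-- ===== Notes on version B (the rewrite author's own statement) =====
-- stated objective: alternative
-- what changed: Replaces A's tally dict plus running-best scan over its items with a sort-based algorithm: the group keys of the messages are sorted, and a run-length scan over the sorted list picks the first (hence smallest-id) run of strictly maximal length; no tally dict is built at all.
import Mathlib
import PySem

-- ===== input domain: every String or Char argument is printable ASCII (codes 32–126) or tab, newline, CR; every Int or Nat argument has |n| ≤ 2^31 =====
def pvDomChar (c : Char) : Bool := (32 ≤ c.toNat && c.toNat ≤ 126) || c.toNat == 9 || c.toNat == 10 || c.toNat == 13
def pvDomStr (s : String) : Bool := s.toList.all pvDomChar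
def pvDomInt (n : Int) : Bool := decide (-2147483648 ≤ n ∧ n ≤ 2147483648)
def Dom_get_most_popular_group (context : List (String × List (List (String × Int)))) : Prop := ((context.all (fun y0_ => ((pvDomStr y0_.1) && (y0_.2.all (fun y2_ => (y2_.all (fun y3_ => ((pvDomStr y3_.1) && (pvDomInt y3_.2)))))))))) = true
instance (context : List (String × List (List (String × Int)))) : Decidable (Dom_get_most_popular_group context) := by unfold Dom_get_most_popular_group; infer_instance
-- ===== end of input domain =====

-- B replaces A's tally dict + running-best scan by a different algorithm: sort the messages'
-- group keys and run-length-scan the sorted list (first strictly-longest run wins, so ties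
-- keep the smallest id); no tally dict is built.

-- lookup in an inner dict (message/channel/group record): d[k], none = KeyError
def pvDget (d : List (String × Int)) (k : String) : Option Int :=
  (PySem.Dict.mk d).get? k

-- key of one message: channel_to_group[message['channel']] (none = KeyError)
def pvMsgKey (c2g : PySem.Dict Int Int) (m : List (String × Int)) : Option Int :=
  (pvDget m "channel").bind (fun ch => c2g.get? ch)

-- channel_to_group construction, shared by both pythons (A: for-loop, B: dict comprehension —
-- the same insertions): channel_to_group[channel['id']] = channel['group']
def pvC2gStep (d : PySem.Dict Int Int) (ch : List (String × Int)) : PySem.Dict Int Int :=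
  match pvDget ch "id", pvDget ch "group" with
  | some i, some g => d.insert i g
  | _, _ => d

-- ===== PORT A =====
def get_most_popular_group (context : List (String × List (List (String × Int)))) : Option Int :=
  let ctx := PySem.Dict.mk context
  let early : Option Int :=
    match ctx.get? "groups" with
    | none => none
    | some gs =>
      if gs = [] then none
      else PySem.List.min? (gs.filterMap (fun g => pvDget g "id")) (fun x => x)
  match ctx.get? "messages" with
  | none => early
  | some msgs =>
    if msgs = [] then early
    else
      let c2g : PySem.Dict Int Int := (ctx.getD "channels" []).foldl pvC2gStep PySem.Dict.empty
      let tally : PySem.Dict Int Int := msgs.foldl (fun d m =>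
          match pvMsgKey c2g m with
          | some key => d.modify key 0 (· + 1)
          | none => d) PySem.Dict.empty
      match tally.keys with
      | [] => none        -- unreachable under Pre_ (tally nonempty); Python would raise
      | k0 :: _ =>
        some (tally.items.foldl (fun key co =>
            if co.2 > tally.getD key 0 then co.1
            else if co.2 = tally.getD key 0 then min key co.1
            else key) k0)

-- ===== PORT B =====
-- B's while loop over the sorted key list: one step per run of equal keys
-- (j advances over the run; take the run's id iff its length strictly beats best_count)
def pvRunScan : Int → Int → List Int → Int
  | b, _, [] => b
  | b, c, k :: t =>
      if ((t.takeWhile (· == k)).length : Int) + 1 > c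
      then pvRunScan k (((t.takeWhile (· == k)).length : Int) + 1) (t.dropWhile (· == k))
      else pvRunScan b c (t.dropWhile (· == k))
termination_by _ _ L => L.length
decreasing_by
  all_goals simpa using Nat.lt_succ_of_le (List.length_dropWhile_le _ t)

def get_most_popular_group_alt (context : List (String × List (List (String × Int)))) : Option Int :=
  let ctx := PySem.Dict.mk context
  let early : Option Int :=
    match ctx.get? "groups" with
    | none => none
    | some gs =>
      if gs = [] then none
      else PySem.List.min? (gs.filterMap (fun g => pvDget g "id")) (fun x => x)
  match ctx.get? "messages" with
  | none => early
  | some msgs =>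
    if msgs = [] then early
    else
      let c2g : PySem.Dict Int Int := (ctx.getD "channels" []).foldl pvC2gStep PySem.Dict.empty
      match PySem.List.sorted (msgs.filterMap (pvMsgKey c2g)) (fun x => x) with
      | [] => none        -- unreachable under Pre_; Python's keys[0] would raise
      | k0 :: kt => some (pvRunScan k0 0 (k0 :: kt))

-- ===== PRECONDITION & SPEC =====
-- Pre_ excludes exactly the KeyError inputs of A: a group record without 'id' on the empty-messages
-- path; with messages present, a missing 'channels' key, a channel record without 'id'/'group', or a
-- message without 'channel' or whose channel id is not among the channels' ids.
def Pre_get_most_popular_group (context : List (String × List (List (String × Int)))) : Prop :=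
  let ctx := PySem.Dict.mk context
  let msgs := ctx.getD "messages" []
  if msgs = [] then
    ∀ g ∈ ctx.getD "groups" [], (PySem.Dict.mk g).contains "id" = true
  else
    ctx.contains "channels" = true ∧
    (∀ c ∈ ctx.getD "channels" [], (PySem.Dict.mk c).contains "id" = true ∧ (PySem.Dict.mk c).contains "group" = true) ∧
    (∀ m ∈ msgs, ∃ ch ∈ (ctx.getD "channels" []).filterMap (fun c => (PySem.Dict.mk c).get? "id"),
        (PySem.Dict.mk m).get? "channel" = some ch)
instance (context : List (String × List (List (String × Int)))) : Decidable (Pre_get_most_popular_group context) := by unfold Pre_get_most_popular_group; infer_instance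

def pvWitness_get_most_popular_group : (List (String × List (List (String × Int)))) :=
  [("messages", [[("channel", 1)], [("channel", 2)], [("channel", 1)]]),
   ("channels", [[("id", 1), ("group", 7)], [("id", 2), ("group", 5)]])]

def Spec_get_most_popular_group (context : List (String × List (List (String × Int)))) (out : Option Int) : Prop := out = get_most_popular_group_alt context
instance (context : List (String × List (List (String × Int)))) (out : Option Int) : Decidable (Spec_get_most_popular_group context out) := by unfold Spec_get_most_popular_group; infer_instance

-- ===== CLAIM (what is proved, stated in full; the proofs are below) =====
def Claim_equal_get_most_popular_group : Prop := ∀ (context : List (String × List (List (String × Int)))), Dom_get_most_popular_group context → Pre_get_most_popular_group context → Spec_get_most_popular_group context (get_most_popular_group context)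

-- ===== LEMMAS AND PROOFS =====

-- selection state: (current best key, its count); one step of A's running-best loop, values made explicit
def pvSelStep (s : Int × Int) (p : Int × Int) : Int × Int :=
  if p.2 > s.2 then p else if p.2 = s.2 then (min s.1 p.1, s.2) else s

def pvMinList : List Int → Int
  | [] => 0
  | k :: t => t.foldl min k

-- A's counting loop, which skips `none` keys, is the Counter of the filterMap of the keys
theorem pv_tally_eq_counter (c2g : PySem.Dict Int Int) (msgs : List (List (String × Int))) :
    msgs.foldl (fun d m =>
        match pvMsgKey c2g m with
        | some key => d.modify key 0 (· + 1)
        | none => d) (PySem.Dict.empty : PySem.Dict Int Int)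
      = PySem.Dict.counter (msgs.filterMap (pvMsgKey c2g)) := by
  rw [PySem.Dict.counter_eq_foldl]
  suffices h : ∀ d : PySem.Dict Int Int,
      msgs.foldl (fun d m =>
        match pvMsgKey c2g m with
        | some key => d.modify key 0 (· + 1)
        | none => d) d
      = (msgs.filterMap (pvMsgKey c2g)).foldl (fun d x => d.modify x 0 (· + 1)) d from h _
  induction msgs with
  | nil => intro d; rfl
  | cons m t ih => intro d; cases h : pvMsgKey c2g m <;> simp [h, ih]

theorem pv_c2g_contains_mono :
    ∀ (cs : List (List (String × Int))) (d : PySem.Dict Int Int) (ch : Int),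
    d.contains ch = true → (cs.foldl pvC2gStep d).contains ch = true := by
  intro cs
  induction cs with
  | nil => intro d ch h; exact h
  | cons c t ih =>
    intro d ch h
    simp only [List.foldl_cons]
    apply ih
    unfold pvC2gStep
    cases hid : pvDget c "id" with
    | none => exact h
    | some i =>
      cases hg : pvDget c "group" with
      | none => exact h
      | some g => simp [PySem.Dict.contains_insert, h]

theorem pv_c2g_contains :
    ∀ (cs : List (List (String × Int))) (d : PySem.Dict Int Int) (ch : Int),
    ch ∈ cs.filterMap (fun c => (PySem.Dict.mk c).get? "id") →
    (∀ c ∈ cs, (PySem.Dict.mk c).contains "group" = true) →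
    (cs.foldl pvC2gStep d).contains ch = true := by
  intro cs
  induction cs with
  | nil => intro d ch h _; simp at h
  | cons c t ih =>
    intro d ch hmem hwf
    simp only [List.foldl_cons]
    cases hid : (PySem.Dict.mk c).get? "id" with
    | none =>
      rw [List.filterMap_cons, hid] at hmem
      have hstep : pvC2gStep d c = d := by unfold pvC2gStep pvDget; rw [hid]
      rw [hstep]
      exact ih d ch hmem (fun c hc => hwf c (List.mem_cons_of_mem _ hc))
    | some i =>
      have hgc : (PySem.Dict.mk c).contains "group" = true := hwf c List.mem_cons_self
      have hgs : ((PySem.Dict.mk c).get? "group").isSome = true := by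
        rw [← PySem.Dict.contains_eq_isSome_get?]; exact hgc
      obtain ⟨g, hg⟩ := Option.isSome_iff_exists.mp hgs
      have hstep : pvC2gStep d c = d.insert i g := by unfold pvC2gStep pvDget; rw [hid, hg]
      rw [hstep]
      rw [List.filterMap_cons, hid] at hmem
      rcases List.mem_cons.mp hmem with h | h
      · subst h
        exact pv_c2g_contains_mono t _ ch (PySem.Dict.contains_insert_self _ _ _)
      · exact ih _ ch h (fun c hc => hwf c (List.mem_cons_of_mem _ hc))

-- A's dict-lookup selection loop is pvSelStep once the looked-up counts are the pair values
theorem pv_fold_eq_sel (d : PySem.Dict Int Int) :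
    ∀ (L : List (Int × Int)) (key V : Int),
    (∀ p ∈ L, d.getD p.1 0 = p.2) → d.getD key 0 = V →
    L.foldl (fun key co =>
        if co.2 > d.getD key 0 then co.1
        else if co.2 = d.getD key 0 then min key co.1
        else key) key
      = (L.foldl pvSelStep (key, V)).1 := by
  intro L
  induction L with
  | nil => intro key V _ _; rfl
  | cons p t ih =>
    intro key V hall hkey
    obtain ⟨k, v⟩ := p
    have hv : d.getD k 0 = v := hall (k, v) List.mem_cons_self
    have htail : ∀ q ∈ t, d.getD q.1 0 = q.2 := fun q hq => hall q (List.mem_cons_of_mem _ hq)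
    simp only [List.foldl_cons, pvSelStep, hkey]
    by_cases h1 : v > V
    · simp only [h1, if_true]
      exact ih k v htail hv
    · simp only [h1, if_false]
      by_cases h2 : v = V
      · simp only [h2, if_true]
        have : d.getD (min key k) 0 = V := by
          rcases min_choice key k with h | h <;> rw [h]
          · exact hkey
          · rw [hv, h2]
        exact ih (min key k) V htail this
      · simp only [h2, if_false]
        exact ih key V htail hkey

-- closed form of the running-best loop: max of the counts, then min id among the pairs attaining it
theorem pv_sel_spec :
    ∀ (L : List (Int × Int)) (k0 V : Int),
    L.foldl pvSelStep (k0, V)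
      = (pvMinList ((((k0, V) :: L).filter (fun p => p.2 == L.foldl (fun a p => max a p.2) V)).map (fun p => p.1)),
         L.foldl (fun a p => max a p.2) V) := by
  intro L
  induction L with
  | nil => intro k0 V; simp [pvMinList, List.filter]
  | cons p t ih =>
    intro k0 V
    obtain ⟨k, v⟩ := p
    have hb := PySem.List.le_foldl_max_int t (fun p => p.2) (max V v)
    simp only [List.foldl_cons, pvSelStep]
    by_cases h1 : v > V
    · simp only [h1, if_true]
      rw [ih k v]
      have hMv : max V v = v := max_eq_right (le_of_lt h1)
      rw [hMv] at hb
      have hVne : (V == t.foldl (fun a p => max a p.2) v) = false := by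
        simp only [beq_eq_false_iff_ne, ne_eq]
        intro hVeq
        have : v ≤ V := by rw [hVeq]; exact hb.1
        omega
      simp only [List.filter_cons, hMv, hVne]
      simp
    · simp only [h1, if_false]
      by_cases h2 : v = V
      · subst h2
        simp only [if_true]
        rw [ih (min k0 k) v]
        have hMv : max v v = v := max_self v
        rw [hMv] at hb ⊢
        by_cases hVM : v = t.foldl (fun a p => max a p.2) v
        · have hbeq : (v == t.foldl (fun a p => max a p.2) v) = true := by simp [← hVM]
          simp only [List.filter_cons, hbeq, if_true, List.map_cons]
          simp [pvMinList, List.foldl_cons]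
        · have hbeq : (v == t.foldl (fun a p => max a p.2) v) = false := by simp [hVM]
          simp [hbeq]
      · simp only [h2, if_false]
        rw [ih k0 V]
        have hMv : max V v = V := by omega
        rw [hMv] at hb
        have hvne : (v == t.foldl (fun a p => max a p.2) V) = false := by
          simp only [beq_eq_false_iff_ne, ne_eq]
          intro hveq
          have hVle : V ≤ t.foldl (fun a p => max a p.2) V := by
            have := PySem.List.le_foldl_max_int t (fun p => p.2) V
            exact this.1
          omega
        have hrw : t.foldl (fun a p => max a p.2) (max V v) = t.foldl (fun a p => max a p.2) V := by rw [hMv]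
        simp [List.filter_cons, hvne, hrw]

theorem pv_max_attained :
    ∀ (t : List (Int × Int)) (V : Int),
    t.foldl (fun a p => max a p.2) V = V ∨ ∃ p ∈ t, p.2 = t.foldl (fun a p => max a p.2) V := by
  intro t V
  have hmap : t.foldl (fun a p => max a p.2) V = (t.map Prod.snd).foldl max V := by
    rw [List.foldl_map]
  rcases PySem.List.foldl_max_mem (t.map Prod.snd) V with h | h
  · left; rw [hmap]; exact h
  · right
    rw [hmap]
    obtain ⟨p, hp, hpe⟩ := List.mem_map.mp h
    exact ⟨p, hp, hpe⟩

-- ----- facts about one run of B's scan on a sorted list -----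

-- every element after the first run is strictly greater than the head
theorem pv_rest_gt (k : Int) (t : List Int) (hp : (k :: t).Pairwise (· ≤ ·)) :
    ∀ x ∈ t.dropWhile (· == k), k < x := by
  intro x hx
  have hsub : (t.dropWhile (· == k)).Sublist t := List.dropWhile_sublist _
  cases hrest : t.dropWhile (· == k) with
  | nil => rw [hrest] at hx; simp at hx
  | cons y r =>
    have hne : t.dropWhile (· == k) ≠ [] := by rw [hrest]; simp
    have hy : ((t.dropWhile (· == k)).head hne == k) = false := List.head_dropWhile_not _ hne
    have hyk : y ≠ k := by
      have : (t.dropWhile (· == k)).head hne = y := by simp [hrest]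
      rw [this] at hy; simpa using hy
    have hyt : y ∈ t := hsub.subset (by rw [hrest]; exact List.mem_cons_self)
    have hky : k < y := lt_of_le_of_ne (List.rel_of_pairwise_cons hp hyt) (Ne.symm hyk)
    have hpr : (y :: r).Pairwise (· ≤ ·) := by
      exact List.Pairwise.sublist (hrest ▸ hsub) hp.of_cons
    rw [hrest] at hx
    rcases List.mem_cons.mp hx with rfl | hxr
    · exact hky
    · exact lt_of_lt_of_le hky (List.rel_of_pairwise_cons hpr hxr)

-- the first run captures all copies of the head
theorem pv_count_head (k : Int) (t : List Int) (hp : (k :: t).Pairwise (· ≤ ·)) :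
    (k :: t).count k = (t.takeWhile (· == k)).length + 1 := by
  have hsplit : t.takeWhile (· == k) ++ t.dropWhile (· == k) = t := List.takeWhile_append_dropWhile
  have hrun : (t.takeWhile (· == k)).count k = (t.takeWhile (· == k)).length :=
    List.count_eq_length.mpr (fun b hb => by
      have h := List.mem_takeWhile_imp (p := (· == k)) hb
      exact (beq_iff_eq.mp h).symm)
  have hrest : (t.dropWhile (· == k)).count k = 0 :=
    List.count_eq_zero.mpr (fun hk => lt_irrefl k (pv_rest_gt k t hp k hk))
  have ht : t.count k = (t.takeWhile (· == k)).length := by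
    conv_lhs => rw [← hsplit]
    simp only [List.count_append, hrun, hrest, Nat.add_zero]
  rw [List.count_cons_self, ht]

-- counts of later elements are unchanged by dropping the first run
theorem pv_count_rest (k : Int) (t : List Int) (hp : (k :: t).Pairwise (· ≤ ·)) :
    ∀ x ∈ t.dropWhile (· == k), (k :: t).count x = (t.dropWhile (· == k)).count x := by
  intro x hx
  have hxk : k ≠ x := ne_of_lt (pv_rest_gt k t hp x hx)
  have hsplit : t.takeWhile (· == k) ++ t.dropWhile (· == k) = t := List.takeWhile_append_dropWhile
  have hrun : (t.takeWhile (· == k)).count x = 0 :=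
    List.count_eq_zero.mpr (fun hmem => by
      have h := List.mem_takeWhile_imp (p := (· == k)) hmem
      exact hxk (beq_iff_eq.mp h).symm)
  have ht : t.count x = (t.dropWhile (· == k)).count x := by
    conv_lhs => rw [← hsplit]
    rw [List.count_append, hrun, Nat.zero_add]
  rw [List.count_cons_of_ne hxk, ht]

-- every element is the head or survives into the rest
theorem pv_mem_split (k : Int) (t : List Int) :
    ∀ x ∈ (k :: t), x = k ∨ x ∈ t.dropWhile (· == k) := by
  intro x hx
  rcases List.mem_cons.mp hx with rfl | hxt
  · exact Or.inl rfl
  · have hsplit : t.takeWhile (· == k) ++ t.dropWhile (· == k) = t := List.takeWhile_append_dropWhile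
    rw [← hsplit] at hxt
    rcases List.mem_append.mp hxt with h | h
    · exact Or.inl (beq_iff_eq.mp (List.mem_takeWhile_imp (p := (· == k)) h))
    · exact Or.inr h

-- the invariant of B's scan: on a sorted list it returns the current best if no count beats it,
-- otherwise the smallest element of maximal count
theorem pvRunScan_spec :
    ∀ (n : Nat) (L : List Int), L.length ≤ n → L.Pairwise (· ≤ ·) → ∀ (b c : Int),
    ((∀ x ∈ L, (L.count x : Int) ≤ c) → pvRunScan b c L = b) ∧
    ((∃ x ∈ L, c < (L.count x : Int)) →
       pvRunScan b c L ∈ L ∧ c < (L.count (pvRunScan b c L) : Int) ∧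
       (∀ x ∈ L, (L.count x : Int) ≤ (L.count (pvRunScan b c L) : Int)) ∧
       (∀ x ∈ L, L.count x = L.count (pvRunScan b c L) → pvRunScan b c L ≤ x)) := by
  intro n
  induction n with
  | zero =>
    intro L hlen _ b c
    have : L = [] := List.eq_nil_of_length_eq_zero (Nat.le_zero.mp hlen)
    subst this
    exact ⟨fun _ => by rw [pvRunScan], fun ⟨x, hx, _⟩ => absurd hx (List.not_mem_nil)⟩
  | succ n ih =>
    intro L hlen hp b c
    cases L with
    | nil => exact ⟨fun _ => by rw [pvRunScan], fun ⟨x, hx, _⟩ => absurd hx (List.not_mem_nil)⟩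
    | cons k t =>
      set rest := t.dropWhile (· == k) with hrestdef
      set c1 : Int := ((t.takeWhile (· == k)).length : Int) + 1 with hc1def
      have hck : ((k :: t).count k : Int) = c1 := by
        rw [pv_count_head k t hp]; push_cast [hc1def]; ring
      have hrlen : rest.length ≤ n := by
        have h1 : rest.length ≤ t.length := List.length_dropWhile_le _ t
        have h2 : t.length ≤ n := by simpa using hlen
        omega
      have hrp : rest.Pairwise (· ≤ ·) := List.Pairwise.sublist (List.dropWhile_sublist _) hp.of_cons
      have hcr : ∀ x ∈ rest, ((k :: t).count x : Int) = (rest.count x : Int) := by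
        intro x hx
        have h := pv_count_rest k t hp x (hrestdef ▸ hx)
        rw [← hrestdef] at h
        exact_mod_cast h
      have hgt : ∀ x ∈ rest, k < x := pv_rest_gt k t hp
      have hmem : ∀ x ∈ rest, x ∈ (k :: t) :=
        fun x hx => List.mem_cons_of_mem _ ((List.dropWhile_sublist _).subset hx)
      have hstep : ∀ b' c', pvRunScan b' c' (k :: t) =
          if c1 > c' then pvRunScan k c1 rest else pvRunScan b' c' rest := by
        intro b' c'; rw [pvRunScan]
      constructor
      · -- no count beats c: the scan keeps b
        intro hall
        have hc1c : ¬ c1 > c := by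
          have := hall k List.mem_cons_self
          rw [hck] at this; omega
        rw [hstep, if_neg hc1c]
        exact (ih rest hrlen hrp b c).1 (fun x hx => (hcr x hx) ▸ hall x (hmem x hx))
      · -- some count beats c: the scan finds the smallest maximal-count element
        intro hex
        rw [hstep]
        by_cases hc1c : c1 > c
        · rw [if_pos hc1c]
          by_cases hrex : ∃ x ∈ rest, c1 < (rest.count x : Int)
          · obtain ⟨hr1, hr2, hr3, hr4⟩ := (ih rest hrlen hrp k c1).2 hrex
            set r := pvRunScan k c1 rest
            have hrL : r ∈ (k :: t) := hmem r hr1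
            have hcntr : ((k :: t).count r : Int) = (rest.count r : Int) := hcr r hr1
            refine ⟨hrL, by omega, ?_, ?_⟩
            · intro x hx
              rcases pv_mem_split k t x hx with heq | hxr
              · subst heq; rw [hck, hcntr]; omega
              · rw [hcr x hxr, hcntr]; exact hr3 x hxr
            · intro x hx hcx
              rcases pv_mem_split k t x hx with heq | hxr
              · exfalso
                rw [heq] at hcx
                have hcast : ((k :: t).count k : Int) = ((k :: t).count r : Int) := by exact_mod_cast hcx
                rw [hck, hcntr] at hcast; omega
              · refine hr4 x hxr ?_
                have h1 := hcr x hxr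
                have h2 := hcntr
                have : ((k :: t).count x : Int) = ((k :: t).count r : Int) := by exact_mod_cast hcx
                omega
          · push_neg at hrex
            have hb : pvRunScan k c1 rest = k :=
              (ih rest hrlen hrp k c1).1 (fun x hx => hrex x hx)
            rw [hb]
            refine ⟨List.mem_cons_self, by rw [hck]; omega, ?_, ?_⟩
            · intro x hx
              rcases pv_mem_split k t x hx with heq | hxr
              · subst heq; exact le_refl _
              · rw [hck, hcr x hxr]
                exact hrex x hxr
            · intro x hx _
              rcases pv_mem_split k t x hx with heq | hxr
              · subst heq; exact le_refl _
              · exact le_of_lt (hgt x hxr)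
        · rw [if_neg hc1c]
          have hrex : ∃ x ∈ rest, c < (rest.count x : Int) := by
            obtain ⟨x, hx, hcx⟩ := hex
            rcases pv_mem_split k t x hx with heq | hxr
            · subst heq; rw [hck] at hcx; omega
            · exact ⟨x, hxr, by rw [← hcr x hxr]; exact hcx⟩
          obtain ⟨hr1, hr2, hr3, hr4⟩ := (ih rest hrlen hrp b c).2 hrex
          set r := pvRunScan b c rest
          have hrL : r ∈ (k :: t) := hmem r hr1
          have hcntr : ((k :: t).count r : Int) = (rest.count r : Int) := hcr r hr1
          refine ⟨hrL, by omega, ?_, ?_⟩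
          · intro x hx
            rcases pv_mem_split k t x hx with heq | hxr
            · subst heq; rw [hck, hcntr]; omega
            · rw [hcr x hxr, hcntr]; exact hr3 x hxr
          · intro x hx hcx
            rcases pv_mem_split k t x hx with heq | hxr
            · exfalso
              rw [heq] at hcx
              have hcast : ((k :: t).count k : Int) = ((k :: t).count r : Int) := by exact_mod_cast hcx
              rw [hck, hcntr] at hcast; omega
            · refine hr4 x hxr ?_
              have h1 := hcr x hxr
              have : ((k :: t).count x : Int) = ((k :: t).count r : Int) := by exact_mod_cast hcx
              omega

-- glue: A's min-of-maximal-count over the counter's items equals B's run scan of the sorted keys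
theorem pv_minlist_eq_runscan (ks : List Int) (k0 v0 : Int) (rest : List (Int × Int))
    (hI : (PySem.Dict.counter ks).items = (k0, v0) :: rest)
    (s0 : Int) (st : List Int)
    (hs : PySem.List.sorted ks (fun x => x) = s0 :: st) :
    pvMinList ((((k0, v0) :: rest).filter (fun p => p.2 == rest.foldl (fun a p => max a p.2) v0)).map (fun p => p.1))
      = pvRunScan s0 0 (s0 :: st) := by
  set M : Int := rest.foldl (fun a p => max a p.2) v0 with hMdef
  set L : List Int := s0 :: st with hLdef
  have hLperm : L.Perm ks := hs ▸ PySem.List.sorted_perm ks (fun x => x) false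
  have hpair : L.Pairwise (· ≤ ·) := by
    have := PySem.List.sorted_pairwise ks (fun x => x)
    rw [hs] at this; exact this
  have hcount : ∀ x : Int, L.count x = ks.count x := fun x => hLperm.count_eq x
  have hmem_items : ∀ p : Int × Int, p ∈ (PySem.Dict.counter ks).items ↔
      ∃ x ∈ ks, p = (x, (ks.count x : Int)) := by
    intro p
    rw [PySem.Dict.items_counter]
    constructor
    · intro hp
      obtain ⟨x, hx, rfl⟩ := List.mem_map.mp hp
      exact ⟨x, (PySem.Set.mem_ofList ks x).mp hx, by simp [List.count]⟩
    · rintro ⟨x, hx, rfl⟩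
      exact List.mem_map.mpr ⟨x, (PySem.Set.mem_ofList ks x).mpr hx, by simp [List.count]⟩
  have hM_ub : ∀ x ∈ ks, (ks.count x : Int) ≤ M := by
    intro x hx
    have hp : (x, (ks.count x : Int)) ∈ (k0, v0) :: rest := by
      rw [← hI]; exact (hmem_items _).mpr ⟨x, hx, rfl⟩
    have hmax := PySem.List.le_foldl_max_int rest (fun p => p.2) v0
    rcases List.mem_cons.mp hp with heq | hmem
    · have : (ks.count x : Int) = v0 := congrArg Prod.snd heq
      rw [this]; exact hmax.1
    · exact hmax.2 _ hmem
  have hM_att : ∃ x ∈ ks, (ks.count x : Int) = M := by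
    rcases pv_max_attained rest v0 with hM | ⟨p, hp, hpM⟩
    · have h0 : (k0, v0) ∈ (PySem.Dict.counter ks).items := by rw [hI]; exact List.mem_cons_self
      obtain ⟨x, hx, hxe⟩ := (hmem_items _).mp h0
      refine ⟨x, hx, ?_⟩
      have : v0 = (ks.count x : Int) := congrArg Prod.snd hxe
      omega
    · have h0 : p ∈ (PySem.Dict.counter ks).items := by rw [hI]; exact List.mem_cons_of_mem _ hp
      obtain ⟨x, hx, hxe⟩ := (hmem_items _).mp h0
      refine ⟨x, hx, ?_⟩
      have : p.2 = (ks.count x : Int) := congrArg Prod.snd hxe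
      omega
  -- properties of B's result r
  have hspec := (pvRunScan_spec L.length L le_rfl hpair s0 0).2
    ⟨s0, List.mem_cons_self, by
      have : 0 < L.count s0 := List.count_pos_iff.mpr List.mem_cons_self
      exact_mod_cast this⟩
  set r := pvRunScan s0 0 L with hrdef
  obtain ⟨hr1, _, hr3, hr4⟩ := hspec
  have hrks : r ∈ ks := hLperm.subset hr1
  have hcrM : (ks.count r : Int) = M := by
    refine le_antisymm (hM_ub r hrks) ?_
    obtain ⟨x, hx, hxM⟩ := hM_att
    have hxL : x ∈ L := hLperm.mem_iff.mpr hx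
    have := hr3 x hxL
    rw [hcount x, hcount r] at this
    omega
  -- r is in A's candidate list S
  set S : List Int := (((k0, v0) :: rest).filter (fun p => p.2 == M)).map (fun p => p.1) with hSdef
  have hrS : r ∈ S := by
    have hp : (r, (ks.count r : Int)) ∈ (k0, v0) :: rest := by
      rw [← hI]; exact (hmem_items _).mpr ⟨r, hrks, rfl⟩
    refine List.mem_map.mpr ⟨(r, (ks.count r : Int)), List.mem_filter.mpr ⟨hp, ?_⟩, rfl⟩
    simpa using hcrM
  -- S is nonempty; its minimum is r
  have hSne : S ≠ [] := List.ne_nil_of_mem hrS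
  obtain ⟨a, s', hS⟩ := List.exists_cons_of_ne_nil hSne
  have hmin? : PySem.List.min? S (fun x => x) = some (pvMinList S) := by
    rw [hS, PySem.List.min?_id_cons]; rfl
  have hmS : pvMinList S ∈ S := PySem.List.min?_mem hmin?
  have hmlb : ∀ y ∈ S, pvMinList S ≤ y := fun y hy => PySem.List.min?_isMin hmin? y hy
  -- every member of S has count M, so the tie rule pushes r below it
  have hSM : ∀ y ∈ S, y ∈ ks ∧ (ks.count y : Int) = M := by
    intro y hy
    obtain ⟨p, hpf, rfl⟩ := List.mem_map.mp hy
    have hpl := List.mem_filter.mp hpf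
    have hpit : p ∈ (PySem.Dict.counter ks).items := by rw [hI]; exact hpl.1
    obtain ⟨x, hx, rfl⟩ := (hmem_items _).mp hpit
    refine ⟨hx, ?_⟩
    have := hpl.2
    simpa using this
  obtain ⟨hmks, hmM⟩ := hSM _ hmS
  have hrm : r ≤ pvMinList S := by
    refine hr4 _ (hLperm.mem_iff.mpr hmks) ?_
    have : (L.count (pvMinList S) : Int) = (L.count r : Int) := by
      rw [hcount, hcount, hmM, hcrM]
    exact_mod_cast this
  exact le_antisymm (hmlb r hrS) hrm

-- ===== VERDICT =====
theorem get_most_popular_group_spec : Claim_equal_get_most_popular_group := by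
  intro context _hdom hpre
  show get_most_popular_group context = get_most_popular_group_alt context
  simp only [get_most_popular_group, get_most_popular_group_alt]
  simp only [Pre_get_most_popular_group] at hpre
  rw [PySem.Dict.getD_eq_get?_getD (k := "messages")] at hpre
  cases hm : (PySem.Dict.mk context).get? "messages" with
  | none => rfl
  | some msgs =>
    rw [hm] at hpre
    simp only [Option.getD_some] at hpre
    by_cases hnil : msgs = []
    · simp [hnil]
    · rw [if_neg hnil] at hpre
      simp only [if_neg hnil]
      obtain ⟨hch, hwf, hmap⟩ := hpre
      rw [pv_tally_eq_counter]
      obtain ⟨m0, mt, rfl⟩ : ∃ a l, msgs = a :: l := by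
        cases msgs with
        | nil => exact absurd rfl hnil
        | cons a l => exact ⟨a, l, rfl⟩
      obtain ⟨ch0, hchmem, hmc⟩ := hmap m0 List.mem_cons_self
      have hcont : ((((PySem.Dict.mk context).getD "channels" []).foldl pvC2gStep PySem.Dict.empty).contains ch0) = true :=
        pv_c2g_contains _ PySem.Dict.empty ch0 hchmem (fun c hc => (hwf c hc).2)
      have hsome : ((((PySem.Dict.mk context).getD "channels" []).foldl pvC2gStep PySem.Dict.empty).get? ch0).isSome = true := by
        rw [← PySem.Dict.contains_eq_isSome_get?]; exact hcont
      obtain ⟨g0, hg0⟩ := Option.isSome_iff_exists.mp hsome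
      have hk0m : pvMsgKey (((PySem.Dict.mk context).getD "channels" []).foldl pvC2gStep PySem.Dict.empty) m0 = some g0 := by
        unfold pvMsgKey pvDget
        rw [hmc]
        simpa using hg0
      set c2g := ((PySem.Dict.mk context).getD "channels" []).foldl pvC2gStep PySem.Dict.empty with hc2g
      set ks := (m0 :: mt).filterMap (pvMsgKey c2g) with hksdef
      have hks : ks = g0 :: mt.filterMap (pvMsgKey c2g) := by
        rw [hksdef]; simp [hk0m]
      set d := PySem.Dict.counter ks with hd
      have hnd : d.keys.Nodup := PySem.Dict.nodup_keys_counter _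
      have hkeysne : d.keys ≠ [] := by
        apply List.ne_nil_of_mem (a := g0)
        rw [hd, PySem.Dict.keys_counter, hks]
        rw [PySem.Set.mem_ofList]
        exact List.mem_cons_self
      have hsortedne : PySem.List.sorted ks (fun x => x) ≠ [] := by
        simp only [ne_eq, PySem.List.sorted_eq_nil_iff, hks]; simp
      cases hI : d.items with
      | nil =>
        exact absurd (by simp [PySem.Dict.keys, hI]) hkeysne
      | cons p rest =>
        obtain ⟨k0, v0⟩ := p
        have hkeys : d.keys = k0 :: rest.map (fun p => p.1) := by simp [PySem.Dict.keys, hI]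
        rw [hkeys]
        cases hs : PySem.List.sorted ks (fun x => x) with
        | nil => exact absurd hs hsortedne
        | cons s0 st =>
          dsimp only
          have hAll : ∀ p ∈ d.items, d.getD p.1 0 = p.2 := by
            intro q hq
            obtain ⟨a, b⟩ := q
            exact PySem.Dict.getD_of_mem_items d hq hnd 0
          have hk0v : d.getD k0 0 = v0 :=
            PySem.Dict.getD_of_mem_items d (by rw [hI]; exact List.mem_cons_self) hnd 0
          rw [show ((k0, v0) :: rest) = d.items from hI.symm,
            pv_fold_eq_sel d d.items k0 v0 hAll hk0v, hI, List.foldl_cons]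
          have hsel0 : pvSelStep (k0, v0) (k0, v0) = (k0, v0) := by simp [pvSelStep]
          rw [hsel0, pv_sel_spec]
          exact congrArg some (pv_minlist_eq_runscan ks k0 v0 rest (hd ▸ hI) s0 st hs)
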